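-- pv_equiv track=rewrite | github.com/dbenlopers/SANDBOX | Python/bwt.py | rankAllBwt
-- ===== SOURCE A (Python) =====
-- def rankAllBwt(bw):
--     """
--     Given BWT string bw, returns a map of lists.  Keys are
--     characters and lists are cumulative # of occurrences up to and
--     including the row.
--     """
--     tots = {}
--     rankAll = {}
--     for c in bw:
--         if c not in tots:
--             tots[c] = 0
--             rankAll[c] = []
--     for c in bw:
--         tots[c] += 1
--         for c in tots.keys():
--             rankAll[c].append(tots[c])
--     return rankAll, tots
-- ===== SOURCE B (Python) =====
-- def rankAllBwt(bw):
--     """Same result as A, by a different decomposition: collect the distinct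
--     characters in first-occurrence order, then for each one do a single
--     independent prefix-count scan of bw."""
--     order = []
--     for ch in bw:
--         if ch not in order:
--             order.append(ch)
--     rankAll = {}
--     tots = {}
--     for c in order:
--         counts = []
--         run = 0
--         for ch in bw:
--             if ch == c:
--                 run += 1
--             counts.append(run)
--         rankAll[c] = counts
--         tots[c] = run
--     return rankAll, tots
-- ===== Notes on version B (the rewrite author's own statement) =====
-- stated objective: alternative
-- what changed: A makes one interleaved row-wise pass that updates every per-character list at each row; B first collects the distinct characters in first-occurrence order and then runs one independent prefix-count scan of bw per distinct character.
import Mathlib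
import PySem

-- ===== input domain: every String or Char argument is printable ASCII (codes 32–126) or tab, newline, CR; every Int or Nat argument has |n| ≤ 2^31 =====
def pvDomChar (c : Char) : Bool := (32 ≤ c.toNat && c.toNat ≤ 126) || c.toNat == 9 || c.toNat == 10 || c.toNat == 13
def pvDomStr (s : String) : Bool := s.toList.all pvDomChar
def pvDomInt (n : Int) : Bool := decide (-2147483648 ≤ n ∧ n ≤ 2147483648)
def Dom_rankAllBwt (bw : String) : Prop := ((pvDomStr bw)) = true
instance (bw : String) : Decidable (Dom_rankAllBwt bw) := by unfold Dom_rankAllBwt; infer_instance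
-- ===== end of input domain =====

-- B replaces A's single interleaved row-wise pass (updating every per-character
-- list at each row) by one independent prefix-count scan of bw per distinct
-- character; objective: alternative decomposition, same result.

-- key of a character in the result dicts: the 1-character Python string
def pvKey (c : Char) : String := String.ofList [c]

-- ===== PORT A =====
def rankAllBwt (bw : String) : (List (String × List Int)) × (List (String × Int)) :=
  let cs := bw.toList
  -- first loop: initialise tots[c] = 0, rankAll[c] = [] for unseen c
  let init : PySem.Dict String Int × PySem.Dict String (List Int) :=
    cs.foldl (fun st c =>
      if st.1.contains (pvKey c) then st
      else (st.1.insert (pvKey c) 0, st.2.insert (pvKey c) ([] : List Int)))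
      (PySem.Dict.empty, PySem.Dict.empty)
  -- second loop: tots[c] += 1, then append tots[k] to rankAll[k] for every key k
  let fin :=
    cs.foldl (fun (st : PySem.Dict String Int × PySem.Dict String (List Int)) c =>
      let t := st.1.insert (pvKey c) (st.1.getD (pvKey c) 0 + 1)
      let r := t.keys.foldl (fun r k => r.insert k (r.getD k [] ++ [t.getD k 0])) st.2
      (t, r)) init
  (fin.2.items, fin.1.items)

-- ===== PORT B =====
-- one scan of the text for character c, starting from running count run0:
-- returns (list of cumulative counts at each position, final count)
def pvScanStep (c : Char) (q : List Int × Int) (ch : Char) : List Int × Int :=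
  let run := if ch = c then q.2 + 1 else q.2
  (q.1 ++ [run], run)

def pvScan (c : Char) (run0 : Int) (l : List Char) : List Int × Int :=
  l.foldl (pvScanStep c) ([], run0)

def rankAllBwt_alt (bw : String) : (List (String × List Int)) × (List (String × Int)) :=
  let cs := bw.toList
  let order := cs.foldl (fun acc ch => if acc.contains ch then acc else acc ++ [ch]) ([] : List Char)
  let fin :=
    order.foldl (fun (st : PySem.Dict String (List Int) × PySem.Dict String Int) c =>
      let p := pvScan c 0 cs
      (st.1.insert (pvKey c) p.1, st.2.insert (pvKey c) p.2))
      (PySem.Dict.empty, PySem.Dict.empty)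
  (fin.1.items, fin.2.items)

-- ===== PRECONDITION & SPEC =====
def Spec_rankAllBwt (bw : String) (out : (List (String × List Int)) × (List (String × Int))) : Prop := out = rankAllBwt_alt bw
instance (bw : String) (out : (List (String × List Int)) × (List (String × Int))) : Decidable (Spec_rankAllBwt bw out) := by unfold Spec_rankAllBwt; infer_instance

-- ===== CLAIM (what is proved, stated in full; the proofs are below) =====
def Claim_equal_rankAllBwt : Prop := ∀ (bw : String), Dom_rankAllBwt bw → Spec_rankAllBwt bw (rankAllBwt bw)

-- ===== LEMMAS AND PROOFS =====

theorem pvKey_inj {c d : Char} : pvKey c = pvKey d ↔ c = d := by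
  constructor
  · intro h; have := congrArg String.toList h; simpa [pvKey] using this
  · intro h; rw [h]

theorem pvKey_beq (c d : Char) : (pvKey c == pvKey d) = (c == d) := by
  by_cases h : c = d <;> simp [h, pvKey_inj]

-- the order-accumulating fold (shared shape of A's first loop and B's `order`)
def pvExt (o : List Char) (p : List Char) : List Char :=
  p.foldl (fun acc ch => if acc.contains ch then acc else acc ++ [ch]) o

theorem pvExt_nodup (p : List Char) (o : List Char) (h : o.Nodup) : (pvExt o p).Nodup := by
  induction p generalizing o with
  | nil => exact h
  | cons c p ih =>
    have he : pvExt o (c :: p) = pvExt (if o.contains c then o else o ++ [c]) p := rfl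
    rw [he]
    by_cases hc : o.contains c
    · rw [if_pos hc]; exact ih o h
    · rw [if_neg hc]
      have hcm : c ∉ o := by simpa using hc
      refine ih _ ?_
      have : ∀ a ∈ o, ¬a = c := fun a ha hac => hcm (hac ▸ ha)
      simp only [List.nodup_append, List.nodup_cons]
      refine ⟨h, ⟨by simp, List.nodup_nil⟩, fun a ha b hb => ?_⟩
      simp at hb
      exact hb ▸ this a ha

theorem pvExt_mem_mono (p : List Char) (o : List Char) {x : Char} (h : x ∈ o) : x ∈ pvExt o p := by
  induction p generalizing o with
  | nil => exact h
  | cons c p ih =>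
    have he : pvExt o (c :: p) = pvExt (if o.contains c then o else o ++ [c]) p := rfl
    rw [he]
    by_cases hc : o.contains c
    · rw [if_pos hc]; exact ih o h
    · rw [if_neg hc]; exact ih (o ++ [c]) (by simp [h])

theorem pvExt_mem (p : List Char) (o : List Char) {x : Char} (h : x ∈ p) : x ∈ pvExt o p := by
  induction p generalizing o with
  | nil => cases h
  | cons c p ih =>
    have he : pvExt o (c :: p) = pvExt (if o.contains c then o else o ++ [c]) p := rfl
    rw [he]
    rcases List.mem_cons.mp h with rfl | hx
    · by_cases hc : o.contains x
      · rw [if_pos hc]; exact pvExt_mem_mono p o (by simpa using hc)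
      · rw [if_neg hc]; exact pvExt_mem_mono p (o ++ [x]) (by simp)
    · by_cases hc : o.contains c
      · rw [if_pos hc]; exact ih _ hx
      · rw [if_neg hc]; exact ih _ hx

-- dictionaries in "map over a character list" form
theorem contains_mkD {ν : Type} (o : List Char) (f : Char → ν) (c : Char) :
    (PySem.Dict.mk (o.map fun d => (pvKey d, f d))).contains (pvKey c) = o.contains c := by
  rw [PySem.Dict.contains_eq_decide_mem_keys]
  have hk : (PySem.Dict.mk (o.map fun d => (pvKey d, f d))).keys = o.map pvKey := by
    simp [PySem.Dict.keys]
  rw [hk]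
  by_cases h : c ∈ o
  · simp [List.mem_map, h]
    exact ⟨c, h, rfl⟩
  · have : pvKey c ∉ o.map pvKey := by
      simp only [List.mem_map]
      rintro ⟨d, hd, hkey⟩
      exact h (pvKey_inj.mp hkey ▸ hd)
    simp [this, h]

theorem getD_mkD {ν : Type} (o : List Char) (f : Char → ν) (c : Char) (d0 : ν)
    (hc : c ∈ o) (hnd : o.Nodup) :
    (PySem.Dict.mk (o.map fun d => (pvKey d, f d))).getD (pvKey c) d0 = f c := by
  refine PySem.Dict.getD_of_mem_items _ ?_ ?_ d0
  · exact List.mem_map.mpr ⟨c, hc, rfl⟩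
  · have hk : (PySem.Dict.mk (o.map fun d => (pvKey d, f d))).keys = o.map pvKey := by
      simp [PySem.Dict.keys]
    rw [hk]
    exact hnd.map (fun _ _ h => pvKey_inj.mp h)

theorem insert_mkD_of_mem {ν : Type} (o : List Char) (f : Char → ν) (c : Char) (v : ν)
    (hc : c ∈ o) :
    (PySem.Dict.mk (o.map fun d => (pvKey d, f d))).insert (pvKey c) v
      = PySem.Dict.mk (o.map fun d => (pvKey d, if d = c then v else f d)) := by
  apply PySem.Dict.ext
  rw [PySem.Dict.items_insert_of_contains _ v (by rw [contains_mkD]; simpa using hc)]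
  have : (PySem.Dict.mk (o.map fun d => (pvKey d, f d))).items = o.map fun d => (pvKey d, f d) := rfl
  rw [this, List.map_map]
  show _ = (PySem.Dict.mk (o.map fun d => (pvKey d, if d = c then v else f d))).items
  show _ = o.map fun d => (pvKey d, if d = c then v else f d)
  refine List.map_congr_left (fun d _ => ?_)
  by_cases hdc : d = c
  · subst hdc; simp
  · simp only [hdc, if_false]
    have hne : ¬ pvKey d = pvKey c := fun h => hdc (pvKey_inj.mp h)
    simp [Function.comp, hne]

theorem insert_mkD_of_not_mem {ν : Type} (o : List Char) (f : Char → ν) (c : Char) (v : ν)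
    (hc : c ∉ o) :
    (PySem.Dict.mk (o.map fun d => (pvKey d, f d))).insert (pvKey c) v
      = PySem.Dict.mk (o.map (fun d => (pvKey d, f d)) ++ [(pvKey c, v)]) := by
  apply PySem.Dict.ext
  rw [PySem.Dict.items_insert_of_not_contains _ v (by rw [contains_mkD]; simpa using hc)]

-- A's inner fold over the keys: append w k to every key's list
theorem pvInnerFold (o : List Char) (ks : List Char) (g : Char → List Int) (w : Char → Int)
    (hndo : o.Nodup) (hnd : ks.Nodup) (hsub : ∀ k ∈ ks, k ∈ o) :
    ks.foldl (fun r k => r.insert (pvKey k) (r.getD (pvKey k) [] ++ [w k]))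
        (PySem.Dict.mk (o.map fun c => (pvKey c, g c)))
      = PySem.Dict.mk (o.map fun c => (pvKey c, if c ∈ ks then g c ++ [w c] else g c)) := by
  induction ks generalizing g with
  | nil => simp
  | cons k ks ih =>
    have hk : k ∈ o := hsub k (List.mem_cons_self)
    have hknks : k ∉ ks := (List.nodup_cons.mp hnd).1
    rw [List.foldl_cons, getD_mkD o g k [] hk hndo, insert_mkD_of_mem o g k _ hk]
    have hstep : (PySem.Dict.mk (o.map fun d => (pvKey d, if d = k then g k ++ [w k] else g d)))
        = PySem.Dict.mk (o.map fun d => (pvKey d, if d = k then g d ++ [w d] else g d)) := by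
      apply PySem.Dict.ext
      show (o.map _) = (o.map _)
      refine List.map_congr_left (fun d _ => ?_)
      by_cases hdk : d = k
      · subst hdk; simp
      · simp [hdk]
    rw [hstep, ih _ (List.nodup_cons.mp hnd).2 (fun x hx => hsub x (List.mem_cons_of_mem _ hx))]
    apply PySem.Dict.ext
    show (o.map _) = (o.map _)
    refine List.map_congr_left (fun d _ => ?_)
    by_cases hdk : d = k
    · subst hdk; simp [hknks]
    · by_cases hdks : d ∈ ks <;> simp [hdk, hdks]

-- scan lemmas
theorem pvScan_acc (c : Char) (l : List Char) (acc : List Int) (run : Int) :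
    l.foldl (pvScanStep c) (acc, run)
      = (acc ++ (pvScan c run l).1, (pvScan c run l).2) := by
  induction l generalizing acc run with
  | nil => simp [pvScan]
  | cons a l ih =>
    simp only [pvScan, List.foldl_cons, pvScanStep]
    rw [ih, ih ([] ++ [if a = c then run + 1 else run])]
    simp

theorem pvScan_snd (c : Char) (l : List Char) (run : Int) :
    (pvScan c run l).2 = run + l.count c := by
  induction l generalizing run with
  | nil => simp [pvScan]
  | cons a l ih =>
    simp only [pvScan, List.foldl_cons, pvScanStep] at *
    rw [pvScan_acc c l ([] ++ [if a = c then run + 1 else run]) _]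
    simp only [pvScan] at *
    rw [ih]
    by_cases h : a = c
    · simp [h]; ring
    · have : (a == c) = false := beq_false_of_ne h
      simp [h]

-- A's first loop, in map form
theorem pvFirstLoop (p : List Char) (o : List Char) :
    p.foldl (fun (st : PySem.Dict String Int × PySem.Dict String (List Int)) c =>
        if st.1.contains (pvKey c) then st
        else (st.1.insert (pvKey c) 0, st.2.insert (pvKey c) ([] : List Int)))
      (PySem.Dict.mk (o.map fun c => (pvKey c, (0:Int))),
       PySem.Dict.mk (o.map fun c => (pvKey c, ([] : List Int))))
    = (PySem.Dict.mk ((pvExt o p).map fun c => (pvKey c, (0:Int))),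
       PySem.Dict.mk ((pvExt o p).map fun c => (pvKey c, ([] : List Int)))) := by
  induction p generalizing o with
  | nil => rfl
  | cons c p ih =>
    have he : pvExt o (c :: p) = pvExt (if o.contains c then o else o ++ [c]) p := rfl
    rw [he, List.foldl_cons, contains_mkD]
    by_cases hc : o.contains c
    · rw [if_pos hc]
      simp only [hc, if_true]
      exact ih o
    · rw [if_neg hc]
      simp only [hc]
      have hcm : c ∉ o := by simpa using hc
      rw [insert_mkD_of_not_mem o _ c _ hcm, insert_mkD_of_not_mem o _ c _ hcm]
      have h1 : (o.map (fun d => (pvKey d, (0:Int))) ++ [(pvKey c, (0:Int))])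
          = (o ++ [c]).map fun d => (pvKey d, (0:Int)) := by simp
      have h2 : (o.map (fun d => (pvKey d, ([] : List Int))) ++ [(pvKey c, ([] : List Int))])
          = (o ++ [c]).map fun d => (pvKey d, ([] : List Int)) := by simp
      rw [h1, h2]
      exact ih (o ++ [c])

-- A's second loop, in map form
theorem pvSecondLoop (p : List Char) (o : List Char) (hnd : o.Nodup)
    (hsub : ∀ x ∈ p, x ∈ o) (n : Char → Int) (L : Char → List Int) :
    p.foldl (fun (st : PySem.Dict String Int × PySem.Dict String (List Int)) c =>
        let t := st.1.insert (pvKey c) (st.1.getD (pvKey c) 0 + 1)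
        let r := t.keys.foldl (fun r k => r.insert k (r.getD k [] ++ [t.getD k 0])) st.2
        (t, r))
      (PySem.Dict.mk (o.map fun c => (pvKey c, n c)),
       PySem.Dict.mk (o.map fun c => (pvKey c, L c)))
    = (PySem.Dict.mk (o.map fun c => (pvKey c, n c + p.count c)),
       PySem.Dict.mk (o.map fun c => (pvKey c, L c ++ (pvScan c (n c) p).1))) := by
  induction p generalizing n L with
  | nil =>
    simp [pvScan]
  | cons x p ih =>
    have hx : x ∈ o := hsub x (List.mem_cons_self)
    rw [List.foldl_cons]
    simp only
    rw [getD_mkD o n x 0 hx hnd, insert_mkD_of_mem o n x _ hx]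
    have hkeys : (PySem.Dict.mk (o.map fun d => (pvKey d, if d = x then n x + 1 else n d))).keys
        = o.map pvKey := by
      simp [PySem.Dict.keys]
    rw [hkeys, List.foldl_map,
      pvInnerFold o o L
        (fun k => (PySem.Dict.mk (o.map fun d => (pvKey d, if d = x then n x + 1 else n d))).getD (pvKey k) 0)
        hnd hnd (fun _ h => h)]
    have hr : (o.map fun c => (pvKey c, if c ∈ o then
          L c ++ [(PySem.Dict.mk (o.map fun d => (pvKey d, if d = x then n x + 1 else n d))).getD (pvKey c) 0]
          else L c))
        = o.map fun c => (pvKey c, L c ++ [if c = x then n x + 1 else n c]) := by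
      refine List.map_congr_left (fun c hc => ?_)
      rw [if_pos hc, getD_mkD o (fun d => if d = x then n x + 1 else n d) c 0 hc hnd]
    rw [hr, ih (fun x hx => hsub x (List.mem_cons_of_mem _ hx))
        (fun d => if d = x then n x + 1 else n d)
        (fun c => L c ++ [if c = x then n x + 1 else n c])]
    refine Prod.ext_iff.mpr ⟨?_, ?_⟩
    · apply PySem.Dict.ext
      show (o.map _) = (o.map _)
      refine List.map_congr_left (fun c _ => ?_)
      refine congrArg _ ?_
      by_cases hcx : c = x
      · subst hcx
        have hb : (c == c) = true := beq_self_eq_true c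
        simp only [List.count_cons, hb, if_true]
        push_cast
        ring
      · have hb : (x == c) = false := beq_false_of_ne (fun h => hcx h.symm)
        simp only [if_neg hcx, List.count_cons, hb]
        push_cast
        ring
    · apply PySem.Dict.ext
      show (o.map _) = (o.map _)
      refine List.map_congr_left (fun c _ => ?_)
      refine congrArg _ ?_
      have hscan : (pvScan c (n c) (x :: p)).1
          = [if x = c then n c + 1 else n c] ++ (pvScan c (if x = c then n c + 1 else n c) p).1 := by
        simp only [pvScan, List.foldl_cons, pvScanStep]
        rw [pvScan_acc]
        simp [pvScan]
      rw [hscan]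
      by_cases hcx : c = x
      · subst hcx
        simp [List.append_assoc]
      · have hxc : ¬ x = c := fun h => hcx h.symm
        simp only [if_neg hcx, if_neg hxc]
        simp [List.append_assoc]

-- B's loop over the distinct characters, on items
theorem pvBLoop (os : List Char) (cs : List Char) (hnd : os.Nodup)
    (d1 : PySem.Dict String (List Int)) (d2 : PySem.Dict String Int)
    (h1 : ∀ c ∈ os, d1.contains (pvKey c) = false)
    (h2 : ∀ c ∈ os, d2.contains (pvKey c) = false) :
    os.foldl (fun (st : PySem.Dict String (List Int) × PySem.Dict String Int) c =>
        let p := pvScan c 0 cs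
        (st.1.insert (pvKey c) p.1, st.2.insert (pvKey c) p.2)) (d1, d2)
    = (PySem.Dict.mk (d1.items ++ os.map fun c => (pvKey c, (pvScan c 0 cs).1)),
       PySem.Dict.mk (d2.items ++ os.map fun c => (pvKey c, (pvScan c 0 cs).2))) := by
  induction os generalizing d1 d2 with
  | nil =>
    simp
  | cons c os ih =>
    have hc1 : d1.contains (pvKey c) = false := h1 c List.mem_cons_self
    have hc2 : d2.contains (pvKey c) = false := h2 c List.mem_cons_self
    have hnos : c ∉ os := (List.nodup_cons.mp hnd).1
    rw [List.foldl_cons]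
    simp only
    rw [ih (List.nodup_cons.mp hnd).2 _ _
      (fun d hd => by
        rw [PySem.Dict.contains_insert]
        have : (pvKey d == pvKey c) = false := by
          rw [pvKey_beq]
          exact beq_false_of_ne (fun h => hnos (h ▸ hd))
        rw [this, Bool.false_or]
        exact h1 d (List.mem_cons_of_mem _ hd))
      (fun d hd => by
        rw [PySem.Dict.contains_insert]
        have : (pvKey d == pvKey c) = false := by
          rw [pvKey_beq]
          exact beq_false_of_ne (fun h => hnos (h ▸ hd))
        rw [this, Bool.false_or]
        exact h2 d (List.mem_cons_of_mem _ hd))]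
    rw [PySem.Dict.items_insert_of_not_contains _ _ hc1,
        PySem.Dict.items_insert_of_not_contains _ _ hc2]
    simp [List.append_assoc]

-- ===== VERDICT (by name: the statement is the Claim_ definition above) =====
theorem rankAllBwt_spec : Claim_equal_rankAllBwt := by
  unfold Claim_equal_rankAllBwt
  intro bw _
  unfold Spec_rankAllBwt rankAllBwt rankAllBwt_alt
  simp only
  have hnd : (pvExt [] bw.toList).Nodup := pvExt_nodup bw.toList [] List.nodup_nil
  have hmem : ∀ x ∈ bw.toList, x ∈ pvExt [] bw.toList := fun x hx => pvExt_mem bw.toList [] hx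
  have hA0 : ((PySem.Dict.empty : PySem.Dict String Int), (PySem.Dict.empty : PySem.Dict String (List Int)))
      = (PySem.Dict.mk ((([]:List Char)).map fun c => (pvKey c, (0:Int))),
         PySem.Dict.mk ((([]:List Char)).map fun c => (pvKey c, ([]:List Int)))) := rfl
  rw [hA0, pvFirstLoop bw.toList [],
      pvSecondLoop bw.toList (pvExt [] bw.toList) hnd hmem (fun _ => (0:Int)) (fun _ => ([]:List Int))]
  have horder : bw.toList.foldl (fun acc ch => if acc.contains ch then acc else acc ++ [ch]) ([] : List Char)
      = pvExt [] bw.toList := rfl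
  rw [horder,
      pvBLoop (pvExt [] bw.toList) bw.toList hnd PySem.Dict.empty PySem.Dict.empty
        (fun c _ => PySem.Dict.contains_empty _) (fun c _ => PySem.Dict.contains_empty _)]
  refine Prod.ext_iff.mpr ⟨?_, ?_⟩
  · show ((pvExt [] bw.toList).map _) = ((PySem.Dict.empty : PySem.Dict String (List Int)).items ++ _)
    simp [PySem.Dict.empty]
  · show ((pvExt [] bw.toList).map _) = ((PySem.Dict.empty : PySem.Dict String Int).items ++ _)
    have : ∀ c, ((0:Int) + (bw.toList.count c : Int)) = (pvScan c 0 bw.toList).2 := by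
      intro c
      rw [pvScan_snd]
    simp only [PySem.Dict.empty]
    simp [this]
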